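-- pv_equiv track=rewrite | github.com/DAEUN9/TIL | Soving/programmers/level2/프린터.py | solution
-- ===== SOURCE A (Python) =====
-- from collections import deque
--
-- def solution(priorities, location):
--     answer = 0
--     queue = deque()
--     for i in range(len(priorities)):
--         queue.append([priorities[i], i])
--     while queue:
--         max_n = 0
--         for a, b in queue:
--             if a > max_n:
--                 max_n = a
--         curr = queue.popleft()
--         if queue and (curr[0] < max_n):
--             queue.append(curr)
--         else:
--             answer += 1
--             if curr[1] == location:
--                 break
--     return answer
-- ===== SOURCE B (Python) =====
-- from collections import deque
--
-- def solution(priorities, location):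
--     # Pointer-free max: pop the next priority to print from a pre-sorted deque
--     # instead of rescanning the queue for the max each iteration.
--     remaining = deque(sorted(priorities, reverse=True))
--     queue = deque((p, i) for i, p in enumerate(priorities))
--     answer = 0
--     while queue:
--         p, i = queue.popleft()
--         if p == remaining[0]:
--             remaining.popleft()
--             answer += 1
--             if i == location:
--                 return answer
--         else:
--             queue.append((p, i))
--     return answer
-- ===== Notes on version B (the rewrite author's own statement) =====
-- stated objective: faster
-- what changed: B pre-sorts the priorities descending once and pops the next value to print from that deque, removing A's per-iteration rescan of the whole queue for the maximum.
import Mathlib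
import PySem

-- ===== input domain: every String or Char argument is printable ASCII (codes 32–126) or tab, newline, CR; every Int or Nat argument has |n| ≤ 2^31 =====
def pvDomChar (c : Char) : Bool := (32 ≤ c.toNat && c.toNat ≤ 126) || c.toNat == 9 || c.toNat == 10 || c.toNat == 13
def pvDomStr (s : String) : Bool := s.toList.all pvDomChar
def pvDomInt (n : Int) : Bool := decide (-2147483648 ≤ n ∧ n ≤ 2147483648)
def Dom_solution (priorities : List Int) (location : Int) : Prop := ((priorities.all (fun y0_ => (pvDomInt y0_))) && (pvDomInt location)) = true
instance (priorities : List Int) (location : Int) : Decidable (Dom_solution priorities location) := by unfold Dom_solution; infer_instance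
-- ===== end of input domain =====

-- B replaces A's per-iteration max scan of the queue by popping from a once-sorted
-- descending deque of priorities; return values agree on Pre_.

-- ===== PORT A =====

-- the initial queue [[priorities[i], i] for i in range(len(priorities))]
def enumQ : List Int → Int → List (Int × Int)
  | [], _ => []
  | p :: ps, i => (p, i) :: enumQ ps (i + 1)

-- the inner 'for a, b in queue: if a > max_n: max_n = a' scan, starting from max_n
def pyMax (q : List (Int × Int)) (m : Int) : Int :=
  q.foldl (fun m ab => if ab.1 > m then ab.1 else m) m

-- the while loop; fuel strictly exceeds the number of iterations on any input in Pre_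
def aLoop (location : Int) : Nat → Int → List (Int × Int) → Int
  | 0, answer, _ => answer
  | f + 1, answer, q =>
    match q with
    | [] => answer
    | curr :: rest =>
      let maxn := pyMax (curr :: rest) 0
      if rest ≠ [] ∧ curr.1 < maxn then aLoop location f answer (rest ++ [curr])
      else if curr.2 = location then answer + 1 else aLoop location f (answer + 1) rest

def solution (priorities : List Int) (location : Int) : Int :=
  aLoop location ((priorities.length + 1) * (priorities.length + 1)) 0 (enumQ priorities 0)

-- ===== PORT B =====

-- rem is the 'remaining' deque (priorities sorted descending); rem is never [] while
-- the queue is nonempty (so Python's remaining[0] never raises); the [] arm is dead.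
def bLoop (location : Int) : Nat → Int → List Int → List (Int × Int) → Int
  | 0, answer, _, _ => answer
  | f + 1, answer, rem, q =>
    match q with
    | [] => answer
    | c :: rest =>
      match rem with
      | [] => answer
      | m :: rems =>
        if c.1 = m then
          if c.2 = location then answer + 1 else bLoop location f (answer + 1) rems rest
        else bLoop location f answer (m :: rems) (rest ++ [c])

def solution_alt (priorities : List Int) (location : Int) : Int :=
  bLoop location ((priorities.length + 1) * (priorities.length + 1)) 0
    (PySem.List.sorted priorities (fun x => x) true) (enumQ priorities 0)

-- ===== PRECONDITION & SPEC =====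
-- Pre_ is exactly the set of inputs on which A terminates: A's max_n = 0 sentinel makes
-- the loop requeue negative priorities forever, so A diverges iff the list holds ≥ 2
-- negative priorities and the break does not fire first (i.e. location does not index a
-- non-negative priority); nothing on which A returns is excluded.
def Pre_solution (priorities : List Int) (location : Int) : Prop :=
  priorities.countP (fun p => p < 0) ≤ 1 ∨
  (0 ≤ location ∧ location.toNat < priorities.length ∧ 0 ≤ priorities.getD location.toNat 0)

instance (priorities : List Int) (location : Int) : Decidable (Pre_solution priorities location) := by
  unfold Pre_solution; infer_instance

def pvWitness_solution : List Int × Int := ([2, 1, 3, 2], 2)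

def Spec_solution (priorities : List Int) (location : Int) (out : Int) : Prop := out = solution_alt priorities location
instance (priorities : List Int) (location : Int) (out : Int) : Decidable (Spec_solution priorities location out) := by unfold Spec_solution; infer_instance

-- ===== CLAIM (what is proved, stated in full; the proofs are below) =====
def Claim_equal_solution : Prop := ∀ (priorities : List Int) (location : Int), Dom_solution priorities location → Pre_solution priorities location → Spec_solution priorities location (solution priorities location)

-- ===== LEMMAS AND PROOFS =====

theorem map_fst_enumQ : ∀ (ps : List Int) (i : Int), (enumQ ps i).map Prod.fst = ps := by
  intro ps; induction ps with
  | nil => intro i; rfl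
  | cons p ps ih => intro i; simp [enumQ, ih]

theorem countP_enumQ : ∀ (ps : List Int) (i : Int),
    (enumQ ps i).countP (fun c => decide (c.1 < 0)) = ps.countP (fun p => decide (p < 0)) := by
  intro ps; induction ps with
  | nil => intro i; rfl
  | cons p ps ih => intro i; simp [enumQ, List.countP_cons, ih]

theorem le_pyMax : ∀ (q : List (Int × Int)) (m : Int), m ≤ pyMax q m := by
  intro q; induction q with
  | nil => intro m; simp [pyMax]
  | cons x q ih =>
      intro m
      have h := ih (if x.1 > m then x.1 else m)
      simp only [pyMax, List.foldl] at h ⊢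
      split_ifs at h ⊢ with hx
      · exact le_trans (le_of_lt hx) h
      · exact h

theorem mem_le_pyMax : ∀ (q : List (Int × Int)) (m : Int) (x : Int × Int), x ∈ q → x.1 ≤ pyMax q m := by
  intro q; induction q with
  | nil => intro m x hx; simp at hx
  | cons y q ih =>
      intro m x hx
      rcases List.mem_cons.mp hx with rfl | hx
      · have h := le_pyMax q (if x.1 > m then x.1 else m)
        simp only [pyMax, List.foldl] at h ⊢
        split_ifs at h ⊢ with hy
        · exact h
        · exact le_trans (by omega) h
      · exact ih _ x hx

theorem pyMax_cases : ∀ (q : List (Int × Int)) (m : Int),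
    pyMax q m = m ∨ ∃ x ∈ q, pyMax q m = x.1 := by
  intro q; induction q with
  | nil => intro m; left; rfl
  | cons y q ih =>
      intro m
      by_cases hy : y.1 > m
      · have h := ih y.1
        simp only [pyMax, List.foldl, if_pos hy] at h ⊢
        rcases h with h | ⟨x, hx, h⟩
        · right; exact ⟨y, List.mem_cons_self .., h⟩
        · right; exact ⟨x, List.mem_cons_of_mem _ hx, h⟩
      · have h := ih m
        simp only [pyMax, List.foldl, if_neg hy] at h ⊢
        rcases h with h | ⟨x, hx, h⟩
        · left; exact h
        · right; exact ⟨x, List.mem_cons_of_mem _ hx, h⟩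

theorem pyMax_eq_max (q : List (Int × Int)) (M : Int)
    (hmem : ∀ x ∈ q, x.1 ≤ M) (hM : ∃ x ∈ q, x.1 = M) :
    pyMax q 0 = max 0 M := by
  rcases hM with ⟨y, hy, hyM⟩
  have h1 : M ≤ pyMax q 0 := hyM ▸ mem_le_pyMax q 0 y hy
  have h2 : (0 : Int) ≤ pyMax q 0 := le_pyMax q 0
  rcases pyMax_cases q 0 with h | ⟨x, hx, h⟩
  · omega
  · have := hmem x hx; omega

-- a descending rearrangement of xs IS sorted(xs, reverse=True)
theorem desc_unique (xs ys : List Int) (hp : ys.Perm xs)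
    (hs : ys.Pairwise (fun a b => b ≤ a)) :
    PySem.List.sorted xs (fun x => x) true = ys := by
  have hperm : (PySem.List.sorted xs (fun x => x) true).Perm ys :=
    (PySem.List.sorted_perm xs (fun x => x) true).trans hp.symm
  have hs1 : (PySem.List.sorted xs (fun x => x) true).Pairwise (fun a b : Int => b ≤ a) :=
    PySem.List.sorted_pairwise_rev xs (fun x => x)
  exact List.Perm.eq_of_pairwise (fun a b _ _ h1 h2 => le_antisymm h2 h1) hs1 hs hperm

theorem mem_enumQ : ∀ (ps : List Int) (i : Int) (k : Nat), k < ps.length →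
    (ps.getD k 0, i + (k : Int)) ∈ enumQ ps i := by
  intro ps
  induction ps with
  | nil => intro i k hk; simp at hk
  | cons p ps ih =>
    intro i k hk
    cases k with
    | zero => simp [enumQ]
    | succ k =>
      have h := ih (i + 1) k (by simpa using hk)
      have he : i + ((k + 1 : Nat) : Int) = (i + 1) + (k : Int) := by push_cast; ring
      simp only [enumQ, List.mem_cons]
      right
      rw [show ((p :: ps).getD (k + 1) 0) = ps.getD k 0 from rfl, he]
      exact h

-- the loop invariant: few negatives, or the location entry is still queued non-negative
def LoopInv (location : Int) (q : List (Int × Int)) : Prop :=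
  q.countP (fun c => decide (c.1 < 0)) ≤ 1 ∨ ∃ x ∈ q, x.2 = location ∧ 0 ≤ x.1

theorem loop_eq (location : Int) : ∀ (f : Nat) (answer : Int) (q : List (Int × Int)),
    LoopInv location q →
    aLoop location f answer q =
      bLoop location f answer (PySem.List.sorted (q.map Prod.fst) (fun x => x) true) q := by
  intro f
  induction f with
  | zero => intro answer q _; rfl
  | succ f ih =>
    intro answer q hinv
    match q with
    | [] => rfl
    | c :: rest =>
      -- the sorted list is nonempty; name its head m
      rcases hs : PySem.List.sorted ((c :: rest).map Prod.fst) (fun x => x) true with _ | ⟨m, rems⟩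
      · exact absurd ((PySem.List.sorted_eq_nil_iff _ _ _).mp hs) (by simp)
      have hperm : (m :: rems).Perm ((c :: rest).map Prod.fst) := hs ▸ PySem.List.sorted_perm _ _ _
      have hmax : ∀ y ∈ (c :: rest).map Prod.fst, y ≤ m :=
        PySem.List.key_head_sorted_rev_ge _ (fun x => x) hs
      have hsorted : (m :: rems).Pairwise (fun a b : Int => b ≤ a) := by
        have := PySem.List.sorted_pairwise_rev ((c :: rest).map Prod.fst) (fun x => x)
        rwa [hs] at this
      have hmemm : m ∈ (c :: rest).map Prod.fst := hperm.mem_iff.mp (List.mem_cons_self ..)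
      have hcle : c.1 ≤ m := hmax c.1 (by simp)
      have hpm : pyMax (c :: rest) 0 = max 0 m := by
        refine pyMax_eq_max _ m (fun x hx => hmax x.1 (List.mem_map_of_mem hx)) ?_
        rcases List.mem_map.mp hmemm with ⟨x, hx, hx1⟩
        exact ⟨x, hx, hx1⟩
      simp only [aLoop, bLoop, hpm]
      by_cases hreq : rest ≠ [] ∧ c.1 < max 0 m
      · -- A requeues; show c.1 ≠ m, B requeues too
        have hne : ¬ c.1 = m := by
          intro hcm
          rcases hreq with ⟨hrest, hlt⟩
          rcases le_or_gt 0 m with h0 | h0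
          · omega
          · -- m < 0: every element of q is negative; both invariant disjuncts fail
            rcases hinv with hinv | ⟨x, hx, _, hx1⟩
            · have hall : ∀ x ∈ c :: rest, decide (x.1 < 0) = true := by
                intro x hx
                simp only [decide_eq_true_eq]
                have := hmax x.1 (List.mem_map_of_mem hx)
                omega
              have : (c :: rest).countP (fun c => decide (c.1 < 0)) = (c :: rest).length := by
                rw [List.countP_eq_length]; exact hall
              have hlen : 2 ≤ (c :: rest).length := by
                cases rest with
                | nil => exact absurd rfl hrest
                | cons _ _ => simp
              omega
            · have := hmax x.1 (List.mem_map_of_mem hx)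
              omega
        rw [if_pos hreq, if_neg hne]
        have hsorted' : PySem.List.sorted ((rest ++ [c]).map Prod.fst) (fun x => x) true = m :: rems := by
          refine desc_unique _ _ ?_ hsorted
          have h1 : (rest ++ [c]).map Prod.fst = rest.map Prod.fst ++ [c.1] := by simp
          rw [h1]
          exact hperm.trans (List.perm_append_singleton c.1 (rest.map Prod.fst)).symm
        have hinv' : LoopInv location (rest ++ [c]) := by
          rcases hinv with hinv | ⟨x, hx, hxl, hx1⟩
          · left
            simp only [List.countP_append, List.countP_cons, List.countP_nil] at hinv ⊢
            omega
          · right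
            exact ⟨x, by simp only [List.mem_append, List.mem_singleton]
                         rcases List.mem_cons.mp hx with h | h
                         · right; simp [h]
                         · left; exact h, hxl, hx1⟩
        rw [ih answer (rest ++ [c]) hinv', hsorted']
      · -- A prints; show c.1 = m, B prints too
        have hcm : c.1 = m := by
          by_contra hne
          have hclt : c.1 < m := lt_of_le_of_ne hcle hne
          have hrest : rest ≠ [] := by
            intro hr
            subst hr
            simp at hmemm
            omega
          exact hreq ⟨hrest, by omega⟩
        rw [if_neg hreq, if_pos hcm]
        by_cases hloc : c.2 = location
        · rw [if_pos hloc, if_pos hloc]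
        · rw [if_neg hloc, if_neg hloc]
          have hrems : PySem.List.sorted (rest.map Prod.fst) (fun x => x) true = rems := by
            refine desc_unique _ _ ?_ (List.pairwise_cons.mp hsorted).2
            have : (c.1 :: (rest.map Prod.fst)).Perm (m :: rems) := by
              have h1 : ((c :: rest).map Prod.fst) = c.1 :: rest.map Prod.fst := by simp
              exact (h1 ▸ hperm).symm
            rw [hcm] at this
            exact (List.perm_cons m).mp this.symm
          have hinv' : LoopInv location rest := by
            rcases hinv with hinv | ⟨x, hx, hxl, hx1⟩
            · left; simp only [List.countP_cons] at hinv; omega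
            · right
              refine ⟨x, ?_, hxl, hx1⟩
              rcases List.mem_cons.mp hx with h | h
              · exact absurd (h ▸ hxl) hloc
              · exact h
          rw [ih (answer + 1) rest hinv', hrems]

-- ===== VERDICT (by name: the statement is the Claim_ definition above) =====
theorem solution_spec : Claim_equal_solution := by
  intro priorities location _ hpre
  unfold Spec_solution solution solution_alt
  have hinv : LoopInv location (enumQ priorities 0) := by
    rcases hpre with hpre | ⟨hl0, hll, hlp⟩
    · left; rw [countP_enumQ]; exact hpre
    · right
      refine ⟨(priorities.getD location.toNat 0, location), ?_, rfl, hlp⟩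
      have h := mem_enumQ priorities 0 location.toNat hll
      rwa [zero_add, Int.toNat_of_nonneg hl0] at h
  rw [loop_eq location _ 0 (enumQ priorities 0) hinv, map_fst_enumQ]
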